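-- pv_equiv track=rewrite | github.com/marcepanowyy/AlgorithmsDataStructures | practice/extra/leet_code/dp/triangle.py | create_triangle
-- ===== SOURCE A (Python) =====
-- def create_triangle(T):
--     n = len(T)
--     triangle = []
--     for i in range(n):
--         triangle.append([0]*(i+1))
--     triangle[0][0] = T[0][0]
--     for i in range(1, n):
--         triangle[i][0] = triangle[i-1][0] + T[i][0]
--         triangle[i][i] = triangle[i-1][i-1] + T[i][i]
--
--     return triangle
-- ===== SOURCE B (Python) =====
-- def create_triangle(T):
--     # Stateless: each row is built independently; edge cells are recomputed
--     # from scratch as explicit sums over the rows above, no running state and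
--     # no reading back of previously built rows.
--     return [[sum(T[k][0] for k in range(i + 1)) if j == 0
--              else sum(T[k][k] for k in range(i + 1)) if j == i
--              else 0
--              for j in range(i + 1)]
--             for i in range(len(T))]
-- ===== Notes on version B (the rewrite author's own statement) =====
-- stated objective: alternative
-- what changed: B is a stateless nested comprehension that recomputes each edge cell as an explicit sum over the rows above it, instead of A's mutable grid built as zero rows and then patched via dynamic-programming readback of the previous row.
import Mathlib
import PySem

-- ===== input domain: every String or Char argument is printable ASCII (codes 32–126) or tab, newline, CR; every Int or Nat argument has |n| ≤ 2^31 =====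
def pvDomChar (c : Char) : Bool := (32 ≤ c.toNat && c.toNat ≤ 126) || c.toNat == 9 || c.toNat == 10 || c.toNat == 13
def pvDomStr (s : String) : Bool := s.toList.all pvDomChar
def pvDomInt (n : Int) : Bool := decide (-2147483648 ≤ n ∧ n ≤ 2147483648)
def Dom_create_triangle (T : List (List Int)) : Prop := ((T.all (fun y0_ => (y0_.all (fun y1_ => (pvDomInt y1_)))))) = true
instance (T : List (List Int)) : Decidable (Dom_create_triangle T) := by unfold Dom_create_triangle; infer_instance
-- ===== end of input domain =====

-- B builds every row independently by a stateless comprehension, recomputing each edge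
-- cell as an explicit sum over the rows above it, instead of A's mutable zero-grid
-- patched via readback of the previous row (alternative decomposition, same cost class).

-- ===== PORT A =====
def create_triangle (T : List (List Int)) : List (List Int) :=
  let n := T.length
  let triangle : List (List Int) :=
    (PySem.List.pyRange 0 n 1).foldl (fun tr i => tr ++ [List.replicate (i.toNat + 1) (0 : Int)]) []
  -- triangle[0][0] = T[0][0]
  let triangle :=
    PySem.List.pySetD triangle 0
      ((PySem.List.pyGetD triangle 0 []).set 0 (PySem.List.pyGetD (PySem.List.pyGetD T 0 []) 0 0))
  (PySem.List.pyRange 1 n 1).foldl (fun tr i =>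
    -- triangle[i][0] = triangle[i-1][0] + T[i][0]
    let v0 := PySem.List.pyGetD (PySem.List.pyGetD tr (i - 1) []) 0 0 +
              PySem.List.pyGetD (PySem.List.pyGetD T i []) 0 0
    let tr := PySem.List.pySetD tr i ((PySem.List.pyGetD tr i []).set 0 v0)
    -- triangle[i][i] = triangle[i-1][i-1] + T[i][i]
    let vi := PySem.List.pyGetD (PySem.List.pyGetD tr (i - 1) []) (i - 1) 0 +
              PySem.List.pyGetD (PySem.List.pyGetD T i []) i 0
    PySem.List.pySetD tr i ((PySem.List.pyGetD tr i []).set i.toNat vi)) triangle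

-- ===== PORT B =====
def create_triangle_alt (T : List (List Int)) : List (List Int) :=
  (PySem.List.pyRange 0 T.length 1).map (fun i =>
    (PySem.List.pyRange 0 (i + 1) 1).map (fun j =>
      if j = 0 then
        (PySem.List.pyRange 0 (i + 1) 1).foldl
          (fun s k => s + PySem.List.pyGetD (PySem.List.pyGetD T k []) 0 0) 0
      else if j = i then
        (PySem.List.pyRange 0 (i + 1) 1).foldl
          (fun s k => s + PySem.List.pyGetD (PySem.List.pyGetD T k []) k 0) 0
      else 0))

-- ===== PRECONDITION & SPEC =====
-- Pre_ excludes exactly the inputs on which the Python A raises IndexError: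
-- the empty triangle (T[0][0]) and triangles whose row i is shorter than i+1 (T[i][i]).
def Pre_create_triangle (T : List (List Int)) : Prop :=
  T ≠ [] ∧ ∀ i, (h : i < T.length) → i < T[i].length
instance (T : List (List Int)) : Decidable (Pre_create_triangle T) := by
  unfold Pre_create_triangle; infer_instance
def pvWitness_create_triangle : List (List Int) := [[2], [3, 4], [5, 6, 7]]

def Spec_create_triangle (T : List (List Int)) (out : List (List Int)) : Prop := out = create_triangle_alt T
instance (T : List (List Int)) (out : List (List Int)) : Decidable (Spec_create_triangle T out) := by unfold Spec_create_triangle; infer_instance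

-- ===== CLAIM (what is proved, stated in full; the proofs are below) =====
def Claim_equal_create_triangle : Prop := ∀ (T : List (List Int)), Dom_create_triangle T → Pre_create_triangle T → Spec_create_triangle T (create_triangle T)

-- ===== LEMMAS AND PROOFS =====

-- edge sums: pvL T i = T[0][0]+…+T[i][0],  pvR T i = T[0][0]+…+T[i][i]
def pvL (T : List (List Int)) : Nat → Int
  | 0 => PySem.List.pyGetD (PySem.List.pyGetD T 0 []) 0 0
  | i + 1 => pvL T i + PySem.List.pyGetD (PySem.List.pyGetD T (i + 1 : Nat) []) 0 0

def pvR (T : List (List Int)) : Nat → Int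
  | 0 => PySem.List.pyGetD (PySem.List.pyGetD T 0 []) 0 0
  | i + 1 => pvR T i + PySem.List.pyGetD (PySem.List.pyGetD T (i + 1 : Nat) []) (i + 1 : Nat) 0

-- the row both programs produce at index j
def pvRow (T : List (List Int)) : Nat → List Int
  | 0 => [pvL T 0]
  | j + 1 => [pvL T (j + 1)] ++ List.replicate j (0 : Int) ++ [pvR T (j + 1)]

-- A's grid after the rows 1..m have been patched
def pvGfun (T : List (List Int)) (m j : Nat) : List Int :=
  if j ≤ m then pvRow T j else List.replicate (j + 1) (0 : Int)

theorem pvRow_get_zero (T : List (List Int)) (j : Nat) :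
    PySem.List.pyGetD (pvRow T j) 0 0 = pvL T j := by
  cases j <;> simp [pvRow, PySem.List.pyGetD_zero]

theorem pvRow_get_self (T : List (List Int)) (j : Nat) :
    PySem.List.pyGetD (pvRow T j) (j : Int) 0 = pvR T j := by
  cases j with
  | zero => simp [pvRow, PySem.List.pyGetD_zero, pvL, pvR]
  | succ k =>
    rw [PySem.List.pyGetD_natCast]
    simp [pvRow, List.getD]

theorem pv_set_map_range {α : Type} (f : Nat → α) (n i : Nat) (v : α) :
    ((List.range n).map f).set i v = (List.range n).map (fun j => if i = j then v else f j) := by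
  apply List.ext_getElem
  · simp
  · intro j h1 h2
    simp only [List.length_set, List.length_map, List.length_range] at h1
    simp [List.getElem_set, List.getElem_map, List.getElem_range]

theorem pv_replicate_set_last (k : Nat) (v : Int) :
    (List.replicate (k + 1) (0 : Int)).set k v = List.replicate k (0 : Int) ++ [v] := by
  induction k with
  | zero => simp
  | succ m ih =>
    rw [List.replicate_succ, List.set_cons_succ, ih, List.replicate_succ]
    simp

-- B-side: the recomputed edge sums equal pvL / pvR
theorem pv_sumL (T : List (List Int)) (m : Nat) :
    (PySem.List.pyRange 0 ((m : Int) + 1) 1).foldl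
      (fun s k => s + PySem.List.pyGetD (PySem.List.pyGetD T k []) 0 0) 0 = pvL T m := by
  induction m with
  | zero =>
    simp only [Nat.cast_zero, zero_add]
    rw [PySem.List.pyRange_one_cons (by norm_num), PySem.List.pyRange_one_eq_nil (by norm_num)]
    simp [pvL]
  | succ m ih =>
    have hb : ((m + 1 : Nat) : Int) + 1 = ((m : Int) + 1) + 1 := by push_cast; ring
    rw [hb, PySem.List.pyRange_one_succ_right (by omega), List.foldl_append, ih]
    have hc : (m : Int) + 1 = ((m + 1 : Nat) : Int) := by push_cast; ring
    simp only [List.foldl_cons, List.foldl_nil, hc, pvL]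

theorem pv_sumR (T : List (List Int)) (m : Nat) :
    (PySem.List.pyRange 0 ((m : Int) + 1) 1).foldl
      (fun s k => s + PySem.List.pyGetD (PySem.List.pyGetD T k []) k 0) 0 = pvR T m := by
  induction m with
  | zero =>
    simp only [Nat.cast_zero, zero_add]
    rw [PySem.List.pyRange_one_cons (by norm_num), PySem.List.pyRange_one_eq_nil (by norm_num)]
    simp [pvR]
  | succ m ih =>
    have hb : ((m + 1 : Nat) : Int) + 1 = ((m : Int) + 1) + 1 := by push_cast; ring
    rw [hb, PySem.List.pyRange_one_succ_right (by omega), List.foldl_append, ih]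
    have hc : (m : Int) + 1 = ((m + 1 : Nat) : Int) := by push_cast; ring
    simp only [List.foldl_cons, List.foldl_nil, hc, pvR]

-- B-side: one comprehension row equals pvRow
theorem pv_rowB (T : List (List Int)) (m : Nat) :
    (PySem.List.pyRange 0 ((m : Int) + 1) 1).map (fun j =>
      if j = 0 then pvL T m else if j = (m : Int) then pvR T m else 0) = pvRow T m := by
  have hc : ((m : Int) + 1) = ((m + 1 : Nat) : Int) := by push_cast; ring
  rw [hc, PySem.List.pyRange_zero_natCast, List.map_map]
  have hbody : ∀ k ∈ List.range (m + 1),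
      ((fun j => if j = 0 then pvL T m else if j = (m : Int) then pvR T m else 0) ∘
        (fun k : Nat => (k : Int))) k
      = (fun k : Nat => if k = 0 then pvL T m else if k = m then pvR T m else 0) k := by
    intro k _
    simp [Function.comp, Nat.cast_inj]
  rw [List.map_congr_left hbody]
  cases m with
  | zero => simp [pvRow]
  | succ s =>
    rw [List.range_succ_eq_map, List.map_cons, List.map_map]
    have h2 : ∀ k ∈ List.range (s + 1),
        ((fun k : Nat => if k = 0 then pvL T (s + 1) else if k = s + 1 then pvR T (s + 1) else 0) ∘
          Nat.succ) k
        = (fun k : Nat => if k = s then pvR T (s + 1) else (0 : Int)) k := by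
      intro k _
      simp [Function.comp, Nat.succ_eq_add_one]
    rw [List.map_congr_left h2]
    have h3 : (List.range (s + 1)).map (fun k => if k = s then pvR T (s + 1) else (0 : Int))
        = List.replicate s 0 ++ [pvR T (s + 1)] := by
      rw [List.range_succ, List.map_append, List.map_singleton, if_pos rfl]
      congr 1
      rw [List.map_congr_left (fun k hk => by
        rw [if_neg (Nat.ne_of_lt (List.mem_range.mp hk))])]
      simp
    rw [h3]
    simp [pvRow]

theorem pv_foldB (T : List (List Int)) :
    create_triangle_alt T = (List.range T.length).map (pvRow T) := by
  unfold create_triangle_alt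
  rw [PySem.List.pyRange_zero_natCast, List.map_map]
  apply List.map_congr_left
  intro i _
  simp only [Function.comp]
  rw [pv_sumL T i, pv_sumR T i, pv_rowB T i]

theorem pv_foldA (T : List (List Int)) (m : Nat) (hm : m < T.length) :
    (PySem.List.pyRange 1 (1 + (m : Int)) 1).foldl
      (fun tr i =>
        PySem.List.pySetD
          (PySem.List.pySetD tr i
            ((PySem.List.pyGetD tr i []).set 0
              (PySem.List.pyGetD (PySem.List.pyGetD tr (i - 1) []) 0 0 +
                PySem.List.pyGetD (PySem.List.pyGetD T i []) 0 0)))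
          i
          ((PySem.List.pyGetD
                (PySem.List.pySetD tr i
                  ((PySem.List.pyGetD tr i []).set 0
                    (PySem.List.pyGetD (PySem.List.pyGetD tr (i - 1) []) 0 0 +
                      PySem.List.pyGetD (PySem.List.pyGetD T i []) 0 0)))
                i []).set
            i.toNat
            (PySem.List.pyGetD
                (PySem.List.pyGetD
                  (PySem.List.pySetD tr i
                    ((PySem.List.pyGetD tr i []).set 0
                      (PySem.List.pyGetD (PySem.List.pyGetD tr (i - 1) []) 0 0 +
                        PySem.List.pyGetD (PySem.List.pyGetD T i []) 0 0)))
                  (i - 1) [])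
                (i - 1) 0 +
              PySem.List.pyGetD (PySem.List.pyGetD T i []) i 0)))
      ((List.range T.length).map (pvGfun T 0))
    = (List.range T.length).map (pvGfun T m) := by
  induction m with
  | zero =>
    rw [PySem.List.pyRange_one_eq_nil (by simp)]
    simp
  | succ m ih =>
    have hb : (1 : Int) + ((m + 1 : Nat) : Int) = (1 + (m : Int)) + 1 := by push_cast; ring
    rw [hb, PySem.List.pyRange_one_succ_right (by omega), List.foldl_append, ih (by omega)]
    have hi : (1 : Int) + (m : Int) = ((m + 1 : Nat) : Int) := by push_cast; ring
    have hi1 : ((m + 1 : Nat) : Int) - 1 = ((m : Nat) : Int) := by push_cast; ring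
    simp only [List.foldl_cons, List.foldl_nil, hi, hi1]
    have hget_m : PySem.List.pyGetD ((List.range T.length).map (pvGfun T m)) ((m : Nat) : Int) []
        = pvRow T m := by
      rw [PySem.List.pyGetD_natCast, PySem.List.getD_map_range _ _ _ _ (by omega)]
      simp [pvGfun]
    have hget_m1 : PySem.List.pyGetD ((List.range T.length).map (pvGfun T m)) ((m + 1 : Nat) : Int) []
        = List.replicate (m + 2) (0 : Int) := by
      rw [PySem.List.pyGetD_natCast, PySem.List.getD_map_range _ _ _ _ hm]
      rw [pvGfun, if_neg (by omega)]
    have hv0 : pvL T m + PySem.List.pyGetD (PySem.List.pyGetD T ((m + 1 : Nat) : Int) []) 0 0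
        = pvL T (m + 1) := by simp [pvL]
    rw [hget_m, pvRow_get_zero, hv0, hget_m1]
    have hrow1 : (List.replicate (m + 2) (0 : Int)).set 0 (pvL T (m + 1))
        = pvL T (m + 1) :: List.replicate (m + 1) (0 : Int) := by
      simp [List.replicate_succ]
    rw [hrow1]
    have e1 : PySem.List.pySetD ((List.range T.length).map (pvGfun T m)) ((m + 1 : Nat) : Int)
        (pvL T (m + 1) :: List.replicate (m + 1) (0 : Int))
        = (List.range T.length).map
            (fun j => if m + 1 = j then pvL T (m + 1) :: List.replicate (m + 1) (0 : Int) else pvGfun T m j) := by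
      rw [PySem.List.pySetD_natCast, pv_set_map_range]
    rw [e1]
    have hget_m' : PySem.List.pyGetD
        ((List.range T.length).map
          (fun j => if m + 1 = j then pvL T (m + 1) :: List.replicate (m + 1) (0 : Int) else pvGfun T m j))
        ((m : Nat) : Int) [] = pvRow T m := by
      rw [PySem.List.pyGetD_natCast, PySem.List.getD_map_range _ _ _ _ (by omega)]
      rw [if_neg (by omega), pvGfun, if_pos (by omega)]
    have hget_m1' : PySem.List.pyGetD
        ((List.range T.length).map
          (fun j => if m + 1 = j then pvL T (m + 1) :: List.replicate (m + 1) (0 : Int) else pvGfun T m j))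
        ((m + 1 : Nat) : Int) [] = pvL T (m + 1) :: List.replicate (m + 1) (0 : Int) := by
      rw [PySem.List.pyGetD_natCast, PySem.List.getD_map_range _ _ _ _ hm]
      rw [if_pos rfl]
    have hvi : pvR T m + PySem.List.pyGetD (PySem.List.pyGetD T ((m + 1 : Nat) : Int) []) ((m + 1 : Nat) : Int) 0
        = pvR T (m + 1) := by simp [pvR]
    rw [hget_m', pvRow_get_self, hvi, hget_m1']
    have htn : ((m + 1 : Nat) : Int).toNat = m + 1 := by omega
    rw [htn]
    have hrow2 : (pvL T (m + 1) :: List.replicate (m + 1) (0 : Int)).set (m + 1) (pvR T (m + 1))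
        = pvRow T (m + 1) := by
      rw [List.set_cons_succ, pv_replicate_set_last]
      simp [pvRow]
    rw [hrow2, PySem.List.pySetD_natCast, pv_set_map_range]
    apply List.map_congr_left
    intro j hj
    by_cases h : m + 1 = j
    · subst h; simp [pvGfun]
    · rw [if_neg h, if_neg h, pvGfun, pvGfun]
      by_cases h2 : j ≤ m
      · rw [if_pos h2, if_pos (by omega)]
      · rw [if_neg h2, if_neg (by omega)]

theorem pv_A_init (T : List (List Int)) (hn : 0 < T.length) :
    PySem.List.pySetD
      ((PySem.List.pyRange 0 T.length 1).foldl
        (fun tr i => tr ++ [List.replicate (i.toNat + 1) (0 : Int)]) []) 0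
      ((PySem.List.pyGetD
          ((PySem.List.pyRange 0 T.length 1).foldl
            (fun tr i => tr ++ [List.replicate (i.toNat + 1) (0 : Int)]) []) 0 []).set 0
        (PySem.List.pyGetD (PySem.List.pyGetD T 0 []) 0 0))
    = (List.range T.length).map (pvGfun T 0) := by
  have hz : (PySem.List.pyRange 0 T.length 1).foldl
      (fun tr i => tr ++ [List.replicate (i.toNat + 1) (0 : Int)]) []
      = (List.range T.length).map (fun j => List.replicate (j + 1) (0 : Int)) := by
    rw [PySem.List.foldl_append_singleton_eq_map, PySem.List.pyRange_zero_nat, List.map_map]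
    simp
  rw [hz]
  have h0 : PySem.List.pyGetD ((List.range T.length).map (fun j => List.replicate (j + 1) (0 : Int))) 0 []
      = [(0 : Int)] := by
    rw [PySem.List.pyGetD_zero, PySem.List.getD_map_range _ _ _ _ hn]
    simp
  rw [h0]
  rw [show (0 : Int) = ((0 : Nat) : Int) from rfl, PySem.List.pySetD_natCast, pv_set_map_range]
  apply List.map_congr_left
  intro j hj
  cases j <;> simp [pvGfun, pvRow, pvL, PySem.List.pyGetD_zero]

-- ===== VERDICT (by name: the statement is the Claim_ definition above) =====
theorem create_triangle_spec : Claim_equal_create_triangle := by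
  intro T _ hPre
  obtain ⟨hne, -⟩ := hPre
  have hn : 0 < T.length := List.length_pos_iff.mpr hne
  unfold Spec_create_triangle
  rw [pv_foldB]
  simp only [create_triangle]
  rw [pv_A_init T hn]
  have hcast : ((T.length : Nat) : Int) = 1 + ((T.length - 1 : Nat) : Int) := by omega
  rw [hcast, pv_foldA T (T.length - 1) (by omega)]
  apply List.map_congr_left
  intro j hj
  rw [pvGfun, if_pos (by simp only [List.mem_range] at hj; omega)]
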